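-- pv_equiv track=rewrite | github.com/hectortakami/Python-ADS | 1. Technical Interview/Technical Problems/Amazon Interview/amazon.py | maxProductPairs
-- ===== SOURCE A (Python) =====
-- def maxProductPairs(arr, k): # O(n^2)
--     result = []
--     mulDict = {}
--     for i in range(0, len(arr)):
--         for j in range(0, len(arr)):
--             if i == j:
--                 pass
--             else:
--                 mulDict[(arr[i] * arr[j])] = [arr[j], arr[i]]
--     for key in reversed(sorted(mulDict.keys())):
--         if k > 0:
--             result.append(mulDict.get(key))
--             k-=1
--         else:
--             break
--     return result
-- ===== SOURCE B (Python) =====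
-- from heapq import nlargest
--
-- def maxProductPairs(arr, k):
--     mulDict = {a * b: [b, a]
--                for i, a in enumerate(arr)
--                for j, b in enumerate(arr)
--                if i != j}
--     return [mulDict[p] for p in nlargest(k, mulDict)]
-- ===== Notes on version B (the rewrite author's own statement) =====
-- stated objective: alternative
-- what changed: B builds the product dict in one comprehension over enumerate pairs and selects the top-k distinct products with heapq.nlargest (heap-based partial top-k selection) instead of A's full ascending sort followed by a reversed iteration with a count-down-and-break loop.
import Mathlib
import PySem

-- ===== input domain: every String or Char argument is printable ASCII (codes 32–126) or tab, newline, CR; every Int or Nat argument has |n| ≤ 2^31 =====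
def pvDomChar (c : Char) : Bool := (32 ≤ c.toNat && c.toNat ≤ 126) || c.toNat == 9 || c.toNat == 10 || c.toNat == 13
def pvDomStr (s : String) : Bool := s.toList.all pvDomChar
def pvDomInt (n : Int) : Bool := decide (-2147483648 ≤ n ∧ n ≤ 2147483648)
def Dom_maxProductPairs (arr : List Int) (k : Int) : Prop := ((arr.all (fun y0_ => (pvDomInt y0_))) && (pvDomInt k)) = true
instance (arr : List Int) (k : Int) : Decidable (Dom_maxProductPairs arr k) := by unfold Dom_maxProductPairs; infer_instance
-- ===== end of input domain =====

-- B builds the dict in one comprehension over enumerate pairs and selects the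
-- top-k products with heapq.nlargest instead of a full sort + count-down loop.

-- ===== PORT A =====
-- the second loop of A: 'for key in …: if k > 0: result.append(mulDict.get(key)); k-=1 else: break'
-- (keys come from the dict itself, so mulDict.get(key) is never None; '.getD []' unwraps the Option)
def pvTakeA (d : PySem.Dict Int (List Int)) : List Int → Int → List (List Int)
  | [], _ => []
  | p :: rest, k => if k > 0 then ((d.get? p).getD []) :: pvTakeA d rest (k - 1) else []

def maxProductPairs (arr : List Int) (k : Int) : List (List Int) :=
  let mulDict : PySem.Dict Int (List Int) :=
    (PySem.List.pyRange 0 arr.length 1).foldl (fun d i =>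
      (PySem.List.pyRange 0 arr.length 1).foldl (fun d j =>
        if i == j then d
        else d.insert (PySem.List.pyGetD arr i 0 * PySem.List.pyGetD arr j 0)
                      [PySem.List.pyGetD arr j 0, PySem.List.pyGetD arr i 0]) d)
      PySem.Dict.empty
  pvTakeA mulDict (PySem.List.sorted mulDict.keys (fun x => x) false).reverse k

-- ===== PORT B =====
def maxProductPairs_alt (arr : List Int) (k : Int) : List (List Int) :=
  let mulDict : PySem.Dict Int (List Int) :=
    (PySem.List.enumerate arr 0).foldl (fun d p =>
      (PySem.List.enumerate arr 0).foldl (fun d q =>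
        if p.1 != q.1 then d.insert (p.2 * q.2) [q.2, p.2] else d) d)
      PySem.Dict.empty
  -- heapq.nlargest(k, it) is documented as sorted(it, reverse=True)[:k], returning [] for k <= 0:
  -- ported as take (max k 0).toNat of the reverse-sorted keys
  ((PySem.List.sorted mulDict.keys (fun x => x) true).take (max k 0).toNat).map
    (fun p => (mulDict.get? p).getD [])

-- ===== PRECONDITION & SPEC =====
def Spec_maxProductPairs (arr : List Int) (k : Int) (out : List (List Int)) : Prop := out = maxProductPairs_alt arr k
instance (arr : List Int) (k : Int) (out : List (List Int)) : Decidable (Spec_maxProductPairs arr k out) := by unfold Spec_maxProductPairs; infer_instance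

-- ===== CLAIM (what is proved, stated in full; the proofs are below) =====
def Claim_equal_maxProductPairs : Prop := ∀ (arr : List Int) (k : Int), Dom_maxProductPairs arr k → Spec_maxProductPairs arr k (maxProductPairs arr k)

-- ===== LEMMAS AND PROOFS =====

-- flatten a nested foldl over two lists into a foldl over the pair list
theorem pv_foldl_nested {α β γ : Type} (L : List α) (M : List β) (g : γ → α × β → γ) (d : γ) :
    L.foldl (fun d i => M.foldl (fun d j => g d (i, j)) d) d
      = (L.flatMap (fun i => M.map (fun j => (i, j)))).foldl g d := by
  induction L generalizing d with
  | nil => rfl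
  | cons a L ih => simp [List.flatMap_cons, List.foldl_append, List.foldl_map, ih]

-- a guarded foldl is a foldl over the filtered list
theorem pv_foldl_ite {α γ : Type} (p : α → Bool) (f : γ → α → γ) (L : List α) (d : γ) :
    L.foldl (fun d x => if p x then f d x else d) d = (L.filter p).foldl f d := by
  induction L generalizing d with
  | nil => rfl
  | cons a L ih => by_cases h : p a <;> simp [h, ih]

-- pointwise-equal step functions fold alike
theorem pv_foldl_funcongr {α γ : Type} (L : List α) (f g : γ → α → γ) (d : γ)
    (h : ∀ acc x, f acc x = g acc x) : L.foldl f d = L.foldl g d := by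
  induction L generalizing d with
  | nil => rfl
  | cons a L ih => rw [List.foldl_cons, List.foldl_cons, h, ih]

def pvEntry (arr : List Int) (p : Int × Int) : Int × List Int :=
  (PySem.List.pyGetD arr p.1 0 * PySem.List.pyGetD arr p.2 0,
   [PySem.List.pyGetD arr p.2 0, PySem.List.pyGetD arr p.1 0])

def pvPairs (arr : List Int) : List (Int × Int) :=
  (PySem.List.pyRange 0 arr.length 1).flatMap
    (fun i => (PySem.List.pyRange 0 arr.length 1).map (fun j => (i, j)))

def pvEs (arr : List Int) : List (Int × List Int) :=
  ((pvPairs arr).filter (fun p => p.1 != p.2)).map (pvEntry arr)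

-- A's dict, as a flat insert fold over the forward entry list
theorem pv_dictA_eq (arr : List Int) :
    ((PySem.List.pyRange 0 arr.length 1).foldl (fun d i =>
      (PySem.List.pyRange 0 arr.length 1).foldl (fun d j =>
        if i == j then d
        else d.insert (PySem.List.pyGetD arr i 0 * PySem.List.pyGetD arr j 0)
                      [PySem.List.pyGetD arr j 0, PySem.List.pyGetD arr i 0]) d)
      PySem.Dict.empty)
    = (pvEs arr).foldl (fun d e => d.insert e.1 e.2) PySem.Dict.empty := by
  calc _ = (PySem.List.pyRange 0 arr.length 1).foldl (fun d i =>
            (PySem.List.pyRange 0 arr.length 1).foldl (fun d j =>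
              if ((i, j).1 != (i, j).2)
              then d.insert (pvEntry arr (i, j)).1 (pvEntry arr (i, j)).2 else d) d)
            PySem.Dict.empty := by
          apply pv_foldl_funcongr
          intro acc i
          apply pv_foldl_funcongr
          intro acc2 j
          by_cases h : i = j <;> simp [h, pvEntry]
    _ = (pvPairs arr).foldl (fun d p =>
            if p.1 != p.2 then d.insert (pvEntry arr p).1 (pvEntry arr p).2 else d)
            PySem.Dict.empty :=
          pv_foldl_nested _ _
            (fun (d : PySem.Dict Int (List Int)) (p : Int × Int) =>
              if p.1 != p.2 then d.insert (pvEntry arr p).1 (pvEntry arr p).2 else d) _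
    _ = _ := by
          rw [pv_foldl_ite]
          unfold pvEs
          exact (List.foldl_map (f := pvEntry arr)
            (g := fun d (e : Int × List Int) => PySem.Dict.insert d e.1 e.2)
            (l := (pvPairs arr).filter (fun p => p.1 != p.2))
            (init := PySem.Dict.empty)).symm

-- B's dict IS A's dict: enumerate is the pyRange of indices paired with the elements
theorem pv_dictB_eq (arr : List Int) :
    ((PySem.List.enumerate arr 0).foldl (fun d p =>
      (PySem.List.enumerate arr 0).foldl (fun d q =>
        if p.1 != q.1 then d.insert (p.2 * q.2) [q.2, p.2] else d) d)
      PySem.Dict.empty)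
    = ((PySem.List.pyRange 0 arr.length 1).foldl (fun d i =>
      (PySem.List.pyRange 0 arr.length 1).foldl (fun d j =>
        if i == j then d
        else d.insert (PySem.List.pyGetD arr i 0 * PySem.List.pyGetD arr j 0)
                      [PySem.List.pyGetD arr j 0, PySem.List.pyGetD arr i 0]) d)
      PySem.Dict.empty) := by
  rw [PySem.List.enumerate_eq_map_pyRange (d := 0), List.foldl_map]
  apply pv_foldl_funcongr
  intro acc i
  rw [List.foldl_map]
  apply pv_foldl_funcongr
  intro acc2 j
  by_cases h : i = j <;> simp [h]

-- A's key list, as an ordered dedup of the forward key sequence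
theorem pv_keysA_eq (arr : List Int) :
    ((pvEs arr).foldl (fun d e => d.insert e.1 e.2) PySem.Dict.empty).keys
      = PySem.Set.ofList ((pvEs arr).map (·.1)) := by
  have := PySem.Dict.keys_foldl_insert_key (ν := List Int) (pvEs arr) (fun e => e.1)
    (fun _ e => e.2) PySem.Dict.empty
  simpa [PySem.Set.update_nil_left] using this

-- the reverse-sorted key list IS the sorted key list read backwards (the keys are distinct)
theorem pv_sorted_eq (arr : List Int) :
    PySem.List.sorted ((pvEs arr).foldl (fun d e => d.insert e.1 e.2) PySem.Dict.empty).keys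
        (fun x => x) true
      = (PySem.List.sorted ((pvEs arr).foldl (fun d e => d.insert e.1 e.2) PySem.Dict.empty).keys
          (fun x => x) false).reverse := by
  apply PySem.List.sorted_rev_eq_of_perm_of_pairwise_gt
  · exact (List.reverse_perm _).trans (PySem.List.sorted_perm _ _ _)
  · rw [List.pairwise_reverse, pv_keysA_eq]
    exact PySem.List.sorted_ofList_pairwise_lt _

-- A's output loop is a take-and-map
theorem pv_takeA_eq (d : PySem.Dict Int (List Int)) (L : List Int) (k : Int) :
    pvTakeA d L k = (L.take (max k 0).toNat).map (fun p => (d.get? p).getD []) := by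
  induction L generalizing k with
  | nil => simp [pvTakeA]
  | cons p L ih =>
    by_cases h : k > 0
    · have hm : (max k 0).toNat = (max (k - 1) 0).toNat + 1 := by omega
      simp [pvTakeA, h, hm, ih]
    · have hm : (max k 0).toNat = 0 := by omega
      simp [pvTakeA, h, hm]

-- ===== VERDICT (by name: the statement is the Claim_ definition above) =====
theorem maxProductPairs_spec : Claim_equal_maxProductPairs := by
  intro arr k _
  unfold Spec_maxProductPairs
  simp only [maxProductPairs, maxProductPairs_alt]
  rw [pv_dictB_eq, pv_dictA_eq, pv_takeA_eq, pv_sorted_eq]
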